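-- pv_equiv track=rewrite | github.com/swordow/pactool | pactool.py | cleanUpSiteSet
-- ===== SOURCE A (Python) =====
-- def cleanUpSiteSet(siteSet):
-- 	for i in siteSet:
-- 		# Ignore xxx.xxx/ignored ...
-- 		firstSplash = siteSet[i].find("/");
-- 		if firstSplash != -1:
-- 			siteSet[i] = siteSet[i][:firstSplash];
--
-- 		# Ignore xxxx.xxx*ignored search content
-- 		firstStar = siteSet[i].find("*");
-- 		if firstStar != -1:
-- 			siteSet[i] = siteSet[i][:firstStar];
--
-- 		# Ignore the newline
-- 		firstNL = siteSet[i].find("\n");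
-- 		if firstNL != -1:
-- 			siteSet[i] = siteSet[i][:firstNL];
--
-- 		# Ignore the string contains no dot
-- 		firstDot = siteSet[i].find(".");
-- 		if firstDot == -1:
-- 			siteSet[i] = "";
--
-- 	return siteSet;
-- ===== SOURCE B (Python) =====
-- def cleanUpSiteSet(siteSet):
-- 	# Single character-by-character scan per value: copy characters until the
-- 	# first of '/', '*', '\n' (break), noting whether a dot was seen; keep the
-- 	# scanned prefix only if it contained a dot. No find()/slicing passes.
-- 	for k in siteSet:
-- 		out = []
-- 		has_dot = False
-- 		for ch in siteSet[k]:
-- 			if ch in "/*\n":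
-- 				break
-- 			out.append(ch)
-- 			if ch == ".":
-- 				has_dot = True
-- 		siteSet[k] = "".join(out) if has_dot else ""
-- 	return siteSet
-- ===== Notes on version B (the rewrite author's own statement) =====
-- stated objective: alternative
-- what changed: B replaces A's three find-then-slice passes per value by one character-by-character scan with an accumulator and a break: it copies characters until the first of '/', '*', '\n', tracks whether a dot was seen during the scan, and keeps the accumulated prefix only if it saw a dot.
import Mathlib
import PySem

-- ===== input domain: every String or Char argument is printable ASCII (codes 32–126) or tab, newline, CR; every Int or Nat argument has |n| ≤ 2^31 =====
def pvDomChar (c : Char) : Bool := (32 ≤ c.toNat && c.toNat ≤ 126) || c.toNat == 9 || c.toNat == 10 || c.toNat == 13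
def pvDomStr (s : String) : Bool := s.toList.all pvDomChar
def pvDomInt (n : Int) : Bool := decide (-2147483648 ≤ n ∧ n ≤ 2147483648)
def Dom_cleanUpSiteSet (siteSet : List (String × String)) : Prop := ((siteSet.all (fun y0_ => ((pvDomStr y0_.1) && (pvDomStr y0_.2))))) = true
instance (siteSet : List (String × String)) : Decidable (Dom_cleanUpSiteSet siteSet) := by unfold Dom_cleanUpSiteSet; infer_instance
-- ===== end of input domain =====

-- B replaces A's three find/slice passes per dict value by one character-by-character
-- scan with an accumulator and a break (alternative decomposition, same cost); A mutates
-- its dict argument in place — the equivalence proved here is about the returned mapping.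


-- ===== PORT A =====
-- dict keys are unique and A's loop only reassigns the value at the current key,
-- so 'for i in siteSet: siteSet[i] = …' is a map over the (key, value) pairs in order.
-- one Python block 'p = v.find(sub); if p != -1: v = v[:p]'
def pvFindCut (v : String) (sub : String) : String :=
  let first := PySem.Str.find v sub
  if first ≠ -1 then PySem.Str.slice v none (some first) else v

def pvStepA (v : String) : String :=
  -- Ignore xxx.xxx/ignored ...
  let v1 := pvFindCut v "/"
  -- Ignore xxxx.xxx*ignored search content
  let v2 := pvFindCut v1 "*"
  -- Ignore the newline
  let v3 := pvFindCut v2 "\n"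
  -- Ignore the string contains no dot
  let firstDot := PySem.Str.find v3 "."
  if firstDot = -1 then "" else v3

def cleanUpSiteSet (siteSet : List (String × String)) : List (String × String) :=
  siteSet.map (fun kv => (kv.1, pvStepA kv.2))

-- ===== PORT B =====
-- the inner 'for ch in v: if ch in "/*\n": break; out.append(ch); if ch == ".": has_dot = True'
-- as structural recursion over the character list, returning (out, has_dot)
def pvScanB : List Char → List Char × Bool
  | [] => ([], false)
  | ch :: rest =>
    if ch ∈ "/*\n".toList then ([], false)
    else
      let (t, d) := pvScanB rest
      (ch :: t, (ch = '.') || d)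

def pvStepB (v : String) : String :=
  let (out, hasDot) := pvScanB v.toList
  if hasDot then String.ofList out else ""

def cleanUpSiteSet_alt (siteSet : List (String × String)) : List (String × String) :=
  siteSet.map (fun kv => (kv.1, pvStepB kv.2))

-- ===== PRECONDITION & SPEC =====
def Spec_cleanUpSiteSet (siteSet : List (String × String)) (out : List (String × String)) : Prop := out = cleanUpSiteSet_alt siteSet
instance (siteSet : List (String × String)) (out : List (String × String)) : Decidable (Spec_cleanUpSiteSet siteSet out) := by unfold Spec_cleanUpSiteSet; infer_instance

-- ===== CLAIM (what is proved, stated in full; the proofs are below) =====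
def Claim_equal_cleanUpSiteSet : Prop := ∀ (siteSet : List (String × String)), Dom_cleanUpSiteSet siteSet → Spec_cleanUpSiteSet siteSet (cleanUpSiteSet siteSet)

-- ===== LEMMAS AND PROOFS =====

-- the combined "keep" predicate: characters strictly before the first cut character
def pvKeep (x : Char) : Bool := x ≠ '/' && x ≠ '*' && x ≠ '\n'

-- [c] is a prefix of l.drop k iff l[k]? = some c
theorem pv_sing_prefix_drop (c : Char) (l : List Char) (k : Nat) :
    [c] <+: l.drop k ↔ l[k]? = some c := by
  rw [← List.head?_drop]
  constructor
  · rintro ⟨t, ht⟩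
    rw [← ht]; rfl
  · intro h
    cases hd : l.drop k with
    | nil => simp [hd] at h
    | cons a t => simp [hd] at h; exact ⟨t, by simp [h]⟩

-- take k equals takeWhile p when everything before k satisfies p and position k (if any) fails it
theorem pv_take_eq_takeWhile (p : Char → Bool) :
    ∀ (l : List Char) (k : Nat),
      (∀ i, i < k → ∀ x, l[i]? = some x → p x = true) →
      (∀ x, l[k]? = some x → p x = false) →
      l.take k = l.takeWhile p := by
  intro l
  induction l with
  | nil => intro k _ _; simp
  | cons a t ih =>
    intro k h1 h2
    cases k with
    | zero =>
      have := h2 a (by simp)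
      simp [this]
    | succ n =>
      have ha : p a = true := h1 0 (by omega) a (by simp)
      have : t.take n = t.takeWhile p := by
        refine ih n (fun i hi x hx => h1 (i+1) (by omega) x (by simpa using hx))
          (fun x hx => h2 x (by simpa using hx))
      simp [ha, this]

-- one find/truncate step is takeWhile (· ≠ c)
theorem pv_trunc_eq_takeWhile (l : List Char) (c : Char) :
    (if PySem.Chars.find l [c] ≠ -1 then l.take (PySem.Chars.find l [c]).toNat else l)
      = l.takeWhile (fun x => x ≠ c) := by
  split_ifs with h
  · have hpos : 0 ≤ PySem.Chars.find l [c] := by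
      have := PySem.Chars.neg_one_le_find l [c]; omega
    obtain ⟨hpre, hmin⟩ := PySem.Chars.find_spec hpos
    refine pv_take_eq_takeWhile _ l _ ?_ ?_
    · intro i hi x hx
      simp only [decide_eq_true_eq]
      intro hxc
      exact hmin i hi ((pv_sing_prefix_drop c l i).2 (by rw [← hxc]; exact hx))
    · intro x hx
      have := (pv_sing_prefix_drop c l _).1 hpre
      rw [this] at hx
      simp at hx
      simp [hx]
  · have hnot : ¬ [c] <:+: l := (PySem.Chars.find_eq_neg_one_iff l [c]).1 (by omega)
    have hmem : c ∉ l := fun hc => hnot ((List.singleton_infix_iff c l).2 hc)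
    symm
    exact List.takeWhile_eq_self_iff.2 (fun x hx => by
      simp only [decide_eq_true_eq]; rintro rfl; exact hmem hx)

-- string version of one A step
theorem pv_strStep (v sub : String) (c : Char) (hs : sub.toList = [c]) :
    (pvFindCut v sub).toList = v.toList.takeWhile (fun x => x ≠ c) := by
  have hf : PySem.Str.find v sub = PySem.Chars.find v.toList [c] := by
    rw [PySem.Str.find_eq, hs]
  unfold pvFindCut
  simp only [hf]
  rw [← pv_trunc_eq_takeWhile v.toList c]
  split_ifs with h
  · have hpos : 0 ≤ PySem.Chars.find v.toList [c] := by
      have := PySem.Chars.neg_one_le_find v.toList [c]; omega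
    simp only [PySem.Str.slice]
    rw [show PySem.Chars.slice v.toList none (some (PySem.Chars.find v.toList [c]))
          = v.toList.take (PySem.Chars.find v.toList [c]).toNat from PySem.List.slice_to _ hpos]
    simp
  · rfl

-- A's value transform, at the character-list level
theorem pv_stepA_toList (v : String) :
    (pvStepA v).toList
      = (if PySem.Chars.find (v.toList.takeWhile pvKeep) ['.'] = -1 then []
         else v.toList.takeWhile pvKeep) := by
  have hlist : (pvFindCut (pvFindCut (pvFindCut v "/") "*") "\n").toList
      = v.toList.takeWhile pvKeep := by
    rw [pv_strStep _ "\n" '\n' (by decide), pv_strStep _ "*" '*' (by decide),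
      pv_strStep _ "/" '/' (by decide), List.takeWhile_takeWhile, List.takeWhile_takeWhile]
    congr 1
    funext x
    unfold pvKeep
    by_cases hs : x = '/' <;> by_cases ht : x = '*' <;> by_cases hn : x = '\n' <;>
      simp [hs, ht, hn]
  have hfd : PySem.Str.find (pvFindCut (pvFindCut (pvFindCut v "/") "*") "\n") "."
      = PySem.Chars.find (v.toList.takeWhile pvKeep) ['.'] := by
    rw [PySem.Str.find_eq, hlist, show ".".toList = ['.'] from by decide]
  show (if PySem.Str.find (pvFindCut (pvFindCut (pvFindCut v "/") "*") "\n") "." = -1 then ""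
      else pvFindCut (pvFindCut (pvFindCut v "/") "*") "\n").toList
    = (if PySem.Chars.find (v.toList.takeWhile pvKeep) ['.'] = -1 then []
       else v.toList.takeWhile pvKeep)
  rw [hfd]
  split_ifs with h
  · simp
  · exact hlist

-- B's scan returns exactly the kept prefix together with its dot flag
theorem pv_scanB_eq (l : List Char) :
    pvScanB l = (l.takeWhile pvKeep, decide ('.' ∈ l.takeWhile pvKeep)) := by
  induction l with
  | nil => simp [pvScanB]
  | cons ch rest ih =>
    by_cases h : ch ∈ "/*\n".toList
    · have hk : pvKeep ch = false := by
        have hor : ch = '/' ∨ ch = '*' ∨ ch = '\n' := by simpa using h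
        rcases hor with rfl | rfl | rfl <;> decide
      simp only [pvScanB, if_pos h, List.takeWhile_cons, hk]
      simp
    · have hk : pvKeep ch = true := by
        unfold pvKeep
        have h1 : ch ≠ '/' := fun he => h (by rw [he]; decide)
        have h2 : ch ≠ '*' := fun he => h (by rw [he]; decide)
        have h3 : ch ≠ '\n' := fun he => h (by rw [he]; decide)
        simp [h1, h2, h3]
      simp only [pvScanB, if_neg h, ih, List.takeWhile_cons, hk]
      simp [eq_comm]
      
-- B's value transform, at the character-list level
theorem pv_stepB_toList (v : String) :
    (pvStepB v).toList
      = (if PySem.Chars.find (v.toList.takeWhile pvKeep) ['.'] = -1 then []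
         else v.toList.takeWhile pvKeep) := by
  unfold pvStepB
  rw [pv_scanB_eq]
  by_cases h : PySem.Chars.find (v.toList.takeWhile pvKeep) ['.'] = -1
  · have hnot : ¬ ['.'] <:+: v.toList.takeWhile pvKeep :=
      (PySem.Chars.find_eq_neg_one_iff _ _).1 h
    have hmem : '.' ∉ v.toList.takeWhile pvKeep := fun hc =>
      hnot ((List.singleton_infix_iff _ _).2 hc)
    simp [h, hmem]
  · have hinf : ['.'] <:+: v.toList.takeWhile pvKeep := by
      by_contra hc
      exact h ((PySem.Chars.find_eq_neg_one_iff _ _).2 hc)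
    have hmem : '.' ∈ v.toList.takeWhile pvKeep :=
      (List.singleton_infix_iff _ _).1 hinf
    simp [h, hmem]

theorem pv_stepA_eq_stepB (v : String) : pvStepA v = pvStepB v := by
  apply String.toList_inj.mp
  rw [pv_stepA_toList, pv_stepB_toList]

-- ===== VERDICT (by name: the statement is the Claim_ definition above) =====
theorem cleanUpSiteSet_spec : Claim_equal_cleanUpSiteSet := by
  intro siteSet _
  unfold Spec_cleanUpSiteSet cleanUpSiteSet cleanUpSiteSet_alt
  simp [pv_stepA_eq_stepB]
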